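-- pv_equiv track=rewrite | github.com/ethan-coe-renner/rna-reconstruction | rna.py | find_mid_extended_bases
-- ===== SOURCE A (Python) =====
-- def break_frag(frag, search):
--     fragments = [""]
--     c = 0
--     for singleteton in frag:
--         fragments[c] += singleteton
--         if singleteton in search:
--             c += 1
--             fragments.insert(c, "")
--     if fragments[-1] == "":
--         return fragments[:-1]
--
--     return fragments
--
-- def get_midextended_base(fragment, enzyme):
--     bases = break_frag(fragment, enzyme)
--     if len(bases) < 3:
--         return None
--     return bases[1:-1]
--
-- def find_mid_extended_bases(cu_digest, g_digest):
--     extended_bases = []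
--     for frag in cu_digest:
--         meb = get_midextended_base(frag, ['g'])
--         if meb:
--             extended_bases += meb
--
--     for frag in g_digest:
--         meb = get_midextended_base(frag, ['c', 'u'])
--         if meb:
--             extended_bases += meb
--
--     return extended_bases
-- ===== SOURCE B (Python) =====
-- def find_mid_extended_bases(cu_digest, g_digest):
--     def pieces(frag, delims):
--         if not frag:
--             return []
--         for i, ch in enumerate(frag):
--             if ch in delims:
--                 return [frag[:i + 1]] + pieces(frag[i + 1:], delims)
--         return [frag]
--
--     out = []
--     for frag in cu_digest:
--         p = pieces(frag, "g")
--         if len(p) >= 3: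
--             out += p[1:-1]
--     for frag in g_digest:
--         p = pieces(frag, "cu")
--         if len(p) >= 3:
--             out += p[1:-1]
--     return out
-- ===== Notes on version B (the rewrite author's own statement) =====
-- stated objective: alternative
-- what changed: A builds pieces char-by-char with a counter and in-place list mutation (fragments[c] += ch, insert) then trims and slices per helper; B finds the first delimiter and slices the fragment recursively, collecting the middle pieces directly.
import Mathlib
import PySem

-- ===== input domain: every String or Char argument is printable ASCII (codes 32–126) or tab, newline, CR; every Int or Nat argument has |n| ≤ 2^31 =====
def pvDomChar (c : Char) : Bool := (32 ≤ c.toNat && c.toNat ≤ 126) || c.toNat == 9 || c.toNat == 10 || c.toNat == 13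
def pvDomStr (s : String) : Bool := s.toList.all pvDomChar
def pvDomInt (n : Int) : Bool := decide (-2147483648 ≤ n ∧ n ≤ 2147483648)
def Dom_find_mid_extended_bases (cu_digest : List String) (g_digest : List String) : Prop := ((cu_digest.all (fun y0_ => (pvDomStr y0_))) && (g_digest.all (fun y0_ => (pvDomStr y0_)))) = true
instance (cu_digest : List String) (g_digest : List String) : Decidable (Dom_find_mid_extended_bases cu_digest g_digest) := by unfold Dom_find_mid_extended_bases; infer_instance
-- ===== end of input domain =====

-- B replaces A's char-by-char accumulator (counter + list mutation) by a recursive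
-- split at the first delimiter with direct slicing; same return value, no speed claim.

-- ===== PORT A =====
-- A's enzyme lists hold single-character strings; they are ported as List Char
-- (membership 'singleteton in search' is exact on single-character strings).
-- One loop iteration of break_frag: fragments[c] += ch; if ch in search: c += 1; fragments.insert(c, "")
def breakFragStep (search : List Char) (st : List String × Nat) (ch : Char) : List String × Nat :=
  let fs := st.1.set st.2 ((st.1.getD st.2 "").push ch)   -- index c is always in range in A
  if search.contains ch then (fs.insertIdx (st.2 + 1) "", st.2 + 1) else (fs, st.2)

def break_frag (frag : String) (search : List Char) : List String :=
  let st := frag.toList.foldl (breakFragStep search) ([""], 0)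
  -- if fragments[-1] == "": return fragments[:-1]
  if st.1.getLast? = some "" then st.1.dropLast else st.1

def get_midextended_base (fragment : String) (enzyme : List Char) : Option (List String) :=
  let bases := break_frag fragment enzyme
  if bases.length < 3 then none
  else some ((bases.drop 1).dropLast)   -- bases[1:-1], exact for any list

def find_mid_extended_bases (cu_digest : List String) (g_digest : List String) : List String :=
  let eb := cu_digest.foldl (fun acc frag =>
    match get_midextended_base frag ['g'] with
    | some m => if m ≠ [] then acc ++ m else acc   -- 'if meb:' truthiness
    | none => acc) []
  g_digest.foldl (fun acc frag =>
    match get_midextended_base frag ['c', 'u'] with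
    | some m => if m ≠ [] then acc ++ m else acc
    | none => acc) eb

-- ===== PORT B =====
-- pieces(frag, delims): the enumerate loop returns at the FIRST delimiter index,
-- i.e. findIdx?; frag[:i+1] / frag[i+1:] are take / drop (nonnegative in-range slices).
def piecesB (frag : List Char) (delims : List Char) : List (List Char) :=
  if frag = [] then []
  else
    match h : frag.findIdx? (fun ch => delims.contains ch) with
    | some i => frag.take (i + 1) :: piecesB (frag.drop (i + 1)) delims
    | none => [frag]
termination_by frag.length
decreasing_by
  have hi : i < frag.length := (List.findIdx?_eq_some_iff_findIdx_eq.mp h).1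
  simp only [List.length_drop]; omega

def find_mid_extended_bases_alt (cu_digest : List String) (g_digest : List String) : List String :=
  let step := fun (delims : List Char) (acc : List String) (frag : String) =>
    let p := piecesB frag.toList delims
    if 3 ≤ p.length then acc ++ ((p.drop 1).dropLast).map String.ofList else acc
  let out := cu_digest.foldl (step ['g']) []
  g_digest.foldl (step ['c', 'u']) out

-- ===== PRECONDITION & SPEC =====
def Spec_find_mid_extended_bases (cu_digest : List String) (g_digest : List String) (out : List String) : Prop := out = find_mid_extended_bases_alt cu_digest g_digest
instance (cu_digest : List String) (g_digest : List String) (out : List String) : Decidable (Spec_find_mid_extended_bases cu_digest g_digest out) := by unfold Spec_find_mid_extended_bases; infer_instance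

-- ===== CLAIM (what is proved, stated in full; the proofs are below) =====
def Claim_equal_find_mid_extended_bases : Prop := ∀ (cu_digest : List String) (g_digest : List String), Dom_find_mid_extended_bases cu_digest g_digest → Spec_find_mid_extended_bases cu_digest g_digest (find_mid_extended_bases cu_digest g_digest)

-- ===== LEMMAS AND PROOFS =====

-- functional description of A's accumulator loop
def goA (search : List Char) : List Char → List Char → List (List Char)
  | [], acc => [acc]
  | ch :: rest, acc =>
    if search.contains ch then (acc ++ [ch]) :: goA search rest []
    else goA search rest (acc ++ [ch])

lemma goA_ne_nil (search : List Char) (chars acc : List Char) : goA search chars acc ≠ [] := by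
  induction chars generalizing acc with
  | nil => simp [goA]
  | cons ch rest ih => simp only [goA]; split <;> simp [ih]

lemma set_last {α : Type} (done : List α) (x y : α) :
    (done ++ [x]).set done.length y = done ++ [y] := by
  induction done with
  | nil => rfl
  | cons a l ih => simp [List.set, ih]

lemma getD_last {α : Type} (done : List α) (x d : α) :
    (done ++ [x]).getD done.length d = x := by
  induction done with
  | nil => rfl
  | cons a l ih => simpa using ih

lemma insertIdx_last {α : Type} (done : List α) (x y : α) :
    (done ++ [x]).insertIdx (done.length + 1) y = done ++ [x, y] := by
  induction done with
  | nil => rfl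
  | cons a l ih => simpa [List.insertIdx] using ih

lemma push_ofList (l : List Char) (c : Char) :
    (String.ofList l).push c = String.ofList (l ++ [c]) := by
  apply String.toList_injective; simp

lemma foldl_breakFrag (search : List Char) (chars : List Char) :
    ∀ (done : List String) (acc : List Char),
      chars.foldl (breakFragStep search) (done ++ [String.ofList acc], done.length)
        = (done ++ (goA search chars acc).map String.ofList,
           done.length + (goA search chars acc).length - 1) := by
  induction chars with
  | nil => intro done acc; simp [goA]
  | cons ch rest ih =>
    intro done acc
    simp only [List.foldl_cons, breakFragStep, getD_last, push_ofList, set_last, goA]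
    by_cases h : search.contains ch
    · simp only [h, if_true, insertIdx_last]
      have he : done ++ [String.ofList (acc ++ [ch]), ""] =
          (done ++ [String.ofList (acc ++ [ch])]) ++ [String.ofList []] := by simp
      rw [he]
      have h2 : done.length + 1 = (done ++ [String.ofList (acc ++ [ch])]).length := by simp
      rw [h2, ih]
      simp only [Prod.mk.injEq, List.map_cons, List.length_cons, List.length_append]
      exact ⟨by simp, by simp⟩
    · simp only [h, if_false]
      exact ih done (acc ++ [ch])

-- break_frag in terms of goA (goA's result, trailing-empty-piece dropped, mapped to String)
lemma break_frag_goA (frag : String) (search : List Char) :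
    break_frag frag search =
      (if (goA search frag.toList []).getLast? = some [] then
        (goA search frag.toList []).dropLast else goA search frag.toList []).map String.ofList := by
  have h := foldl_breakFrag search frag.toList [] []
  simp only [List.nil_append, List.length_nil] at h
  have h0 : (([""], 0) : List String × Nat) = ([String.ofList []], 0) := by
    have : ("" : String) = String.ofList [] := by apply String.toList_injective; simp
    rw [this]
  simp only [break_frag, h0, h]
  rw [show ∀ (gs : List (List Char)), (gs.map String.ofList).getLast? = gs.getLast?.map String.ofList
      from fun gs => by simp [List.getLast?_map]]
  cases hg : (goA search frag.toList []).getLast? with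
  | none => simp
  | some a =>
    by_cases ha : a = []
    · subst ha
      simp [List.map_dropLast]
    · have hne : String.ofList a ≠ "" := by
        intro hc
        exact ha (by simpa using congrArg String.toList hc)
      simp [hne, ha]

lemma goA_findIdx (search : List Char) (frag : List Char) : ∀ acc,
    goA search frag acc =
      match frag.findIdx? (fun ch => search.contains ch) with
      | none => [acc ++ frag]
      | some i => (acc ++ frag.take (i + 1)) :: goA search (frag.drop (i + 1)) [] := by
  induction frag with
  | nil => intro acc; simp [goA]
  | cons ch rest ih =>
    intro acc
    by_cases h : ch ∈ search
    · simp [goA, h, List.findIdx?_cons]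
    · simp only [goA, List.elem_eq_contains.symm, List.findIdx?_cons, ih (acc ++ [ch])]
      cases hf : rest.findIdx? (fun c => search.contains c) with
      | none => simp [h, hf]
      | some j => simp [h, hf]

-- goA with the trailing empty piece dropped is exactly B's pieces
lemma goA_trim_piecesB (search : List Char) : ∀ (frag : List Char),
    (if (goA search frag []).getLast? = some [] then
      (goA search frag []).dropLast else goA search frag []) = piecesB frag search := by
  intro frag
  induction hn : frag.length using Nat.strong_induction_on generalizing frag with
  | _ n ih =>
  subst hn
  by_cases hf : frag = []
  · subst hf; simp [goA, piecesB]
  · rw [goA_findIdx]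
    cases hidx : frag.findIdx? (fun ch => search.contains ch) with
    | none =>
      have hpb : piecesB frag search = [frag] := by
        rw [piecesB, if_neg hf]
        split
        · next i' heq => rw [hidx] at heq; cases heq
        · rfl
      rw [hpb]
      simp [hf]
    | some i =>
      have hi : i < frag.length := (List.findIdx?_eq_some_iff_findIdx_eq.mp hidx).1
      have hlen : (frag.drop (i + 1)).length < frag.length := by
        simp only [List.length_drop]; omega
      have ihd := ih (frag.drop (i + 1)).length hlen (frag.drop (i + 1)) rfl
      have hpb : piecesB frag search = frag.take (i + 1) :: piecesB (frag.drop (i + 1)) search := by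
        rw [piecesB, if_neg hf]
        split
        · next i' heq => rw [hidx] at heq; injection heq with e; subst e; rfl
        · next heq => rw [hidx] at heq; cases heq
      rw [hpb]
      simp only [List.nil_append]
      have hne := goA_ne_nil search (frag.drop (i + 1)) []
      cases hg : goA search (frag.drop (i + 1)) [] with
      | nil => exact absurd hg hne
      | cons a l =>
        rw [hg] at ihd
        rw [List.getLast?_cons_cons,
          show (frag.take (i + 1) :: a :: l).dropLast = frag.take (i + 1) :: (a :: l).dropLast
            from by simp, ← ihd]
        split <;> rfl

-- the per-fragment correspondence: A's break_frag = B's pieces (mapped to String)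
lemma break_frag_piecesB (frag : String) (search : List Char) :
    break_frag frag search = (piecesB frag.toList search).map String.ofList := by
  rw [break_frag_goA, goA_trim_piecesB]

-- the two per-fragment fold steps are equal
lemma step_eq (delims : List Char) (acc : List String) (frag : String) :
    (match get_midextended_base frag delims with
     | some m => if m ≠ [] then acc ++ m else acc
     | none => acc)
    = (if 3 ≤ (piecesB frag.toList delims).length then
        acc ++ (((piecesB frag.toList delims).drop 1).dropLast).map String.ofList else acc) := by
  simp only [get_midextended_base, break_frag_piecesB, List.length_map]
  by_cases h3 : (piecesB frag.toList delims).length < 3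
  · have h3' : ¬ 3 ≤ (piecesB frag.toList delims).length := by omega
    simp only [h3, if_true, h3', if_false]
  · have h3' : 3 ≤ (piecesB frag.toList delims).length := by omega
    have hne : ((((piecesB frag.toList delims).map String.ofList).drop 1).dropLast : List String) ≠ [] := by
      intro hc
      have hlc := congrArg List.length hc
      simp at hlc
      omega
    simp only [h3, if_false, h3', if_true, hne, ne_eq, not_false_iff]
    simp [List.map_dropLast, List.map_drop]

-- ===== VERDICT (by name: the statement is the Claim_ definition above) =====
theorem find_mid_extended_bases_spec : Claim_equal_find_mid_extended_bases := by
  intro cu_digest g_digest _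
  show _ = _
  simp only [find_mid_extended_bases, find_mid_extended_bases_alt]
  congr 1
  · funext acc frag; exact step_eq ['c', 'u'] acc frag
  · congr 1; funext acc frag; exact step_eq ['g'] acc frag
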